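-- pv_equiv track=rewrite | github.com/DinithaSasinduDissanayake/TPSM-Project | scripts/python/data_loader.py | _normalize_col_token
-- ===== SOURCE A (Python) =====
-- def _normalize_col_token(name: str) -> str:
--     """Normalize column labels for tolerant matching across R/Python loaders."""
--     s = str(name).strip()
--     out = []
--     prev_sep = False
--     for ch in s:
--         if ch.isalnum():
--             out.append(ch.lower())
--             prev_sep = False
--         else:
--             if not prev_sep:
--                 out.append(".")
--                 prev_sep = True
--     return "".join(out).strip(".")
-- ===== SOURCE B (Python) =====
-- def _normalize_col_token(name: str) -> str:
--     """Normalize column labels for tolerant matching across R/Python loaders."""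
--     s = str(name).strip()
--     mapped = ''.join(ch.lower() if ch.isalnum() else ' ' for ch in s)
--     return '.'.join(mapped.split())
-- ===== Notes on version B (the rewrite author's own statement) =====
-- stated objective: simpler
-- what changed: Replaces the explicit prev_sep state machine plus trailing dot-strip with a character map to lowercase-or-space followed by whitespace split() and a dot join, letting split() collapse runs and drop boundary separators.
import Mathlib
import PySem

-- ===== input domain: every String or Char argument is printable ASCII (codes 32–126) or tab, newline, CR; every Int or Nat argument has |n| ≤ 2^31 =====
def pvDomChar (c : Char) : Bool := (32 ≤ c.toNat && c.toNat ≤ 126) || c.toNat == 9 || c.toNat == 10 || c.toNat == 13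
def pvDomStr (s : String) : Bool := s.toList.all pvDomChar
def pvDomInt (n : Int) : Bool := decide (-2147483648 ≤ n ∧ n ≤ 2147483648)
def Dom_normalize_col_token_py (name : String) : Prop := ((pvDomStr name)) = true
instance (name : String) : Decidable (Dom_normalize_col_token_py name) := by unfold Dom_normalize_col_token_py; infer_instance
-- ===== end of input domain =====

-- B replaces A's prev_sep state machine (+ final strip('.')) with map-to-space, whitespace split and '.'-join: a simpler decomposition, same cost.

-- ===== PORT A =====
def normalize_col_token_py (name : String) : String :=
  let s := PySem.Str.strip name
  let st :=
    s.toList.foldl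
      (fun (st : List Char × Bool) ch =>
        if PySem.Chars.isalnum ch then (st.1 ++ [PySem.Chars.lowerChar ch], false)
        else if st.2 then st else (st.1 ++ ['.'], true))
      ([], false)
  PySem.Str.stripChars (String.ofList st.1) "."

-- ===== PORT B =====
def normalize_col_token_py_alt (name : String) : String :=
  let s := PySem.Str.strip name
  let mapped := String.ofList (s.toList.map
    (fun ch => if PySem.Chars.isalnum ch then PySem.Chars.lowerChar ch else ' '))
  PySem.Str.join "." (PySem.Str.split₀ mapped)

-- ===== PRECONDITION & SPEC =====
def Spec_normalize_col_token_py (name : String) (out : String) : Prop := out = normalize_col_token_py_alt name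
instance (name : String) (out : String) : Decidable (Spec_normalize_col_token_py name out) := by unfold Spec_normalize_col_token_py; infer_instance

-- ===== CLAIM (what is proved, stated in full; the proofs are below) =====
def Claim_equal_normalize_col_token_py : Prop := ∀ (name : String), Dom_normalize_col_token_py name → Spec_normalize_col_token_py name (normalize_col_token_py name)

-- ===== LEMMAS AND PROOFS =====

-- A's loop, as a structural recursion on the character list
def pvAloop : List Char → Bool → List Char
  | [], _ => []
  | c :: r, p =>
    if PySem.Chars.isalnum c then PySem.Chars.lowerChar c :: pvAloop r false
    else if p then pvAloop r p else '.' :: pvAloop r true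

-- maximal alnum runs, lowercased
def pvToks : List Char → List (List Char)
  | [] => []
  | c :: r =>
    if PySem.Chars.isalnum c then
      (PySem.Chars.lowerChar c :: (r.takeWhile PySem.Chars.isalnum).map PySem.Chars.lowerChar)
        :: pvToks (r.dropWhile PySem.Chars.isalnum)
    else pvToks r
termination_by cs => cs.length
decreasing_by
  · simp only [List.length_cons]
    exact Nat.lt_succ_of_le (List.length_dropWhile_le _ _)
  · simp

def pvJoin : List (List Char) → List Char
  | [] => []
  | [t] => t
  | t :: ts => t ++ '.' :: pvJoin ts

def pvEndSep (cs : List Char) : Bool :=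
  match cs.getLast? with
  | some c => !PySem.Chars.isalnum c
  | none => false

def pvTrail (cs : List Char) : List Char :=
  if pvToks cs ≠ [] ∧ pvEndSep cs = true then ['.'] else []

-- character-level facts
theorem pv_char_le (a b : Char) : (a ≤ b) ↔ a.toNat ≤ b.toNat := by
  rw [Char.le_def, UInt32.le_iff_toNat_le]; rfl

theorem pv_alnum_toNat (c : Char) (h : PySem.Chars.isalnum c = true) :
    (48 ≤ c.toNat ∧ c.toNat ≤ 57) ∨ (65 ≤ c.toNat ∧ c.toNat ≤ 90) ∨ (97 ≤ c.toNat ∧ c.toNat ≤ 122) := by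
  simp only [PySem.Chars.isalnum, PySem.Chars.isalpha, PySem.Chars.isdigit, PySem.Chars.isupper,
    PySem.Chars.islower, Bool.or_eq_true, Bool.and_eq_true, decide_eq_true_eq, pv_char_le] at h
  have h0 : ('0' : Char).toNat = 48 := rfl
  have h9 : ('9' : Char).toNat = 57 := rfl
  have hA : ('A' : Char).toNat = 65 := rfl
  have hZ : ('Z' : Char).toNat = 90 := rfl
  have ha : ('a' : Char).toNat = 97 := rfl
  have hz : ('z' : Char).toNat = 122 := rfl
  omega

theorem pv_lower_toNat (c : Char) (h : PySem.Chars.isalnum c = true) :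
    (48 ≤ (PySem.Chars.lowerChar c).toNat ∧ (PySem.Chars.lowerChar c).toNat ≤ 57) ∨
      (97 ≤ (PySem.Chars.lowerChar c).toNat ∧ (PySem.Chars.lowerChar c).toNat ≤ 122) := by
  have hr := pv_alnum_toNat c h
  have hA : ('A' : Char).toNat = 65 := rfl
  have hZ : ('Z' : Char).toNat = 90 := rfl
  unfold PySem.Chars.lowerChar PySem.Chars.isupper
  split
  · rename_i hu
    simp only [Bool.and_eq_true, decide_eq_true_eq, pv_char_le, hA, hZ] at hu
    have hv : (c.toNat + 32).isValidChar := by left; omega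
    rw [Char.toNat_ofNat, if_pos hv]
    omega
  · rename_i hu
    simp only [Bool.and_eq_true, decide_eq_true_eq, pv_char_le, hA, hZ, not_and] at hu
    omega

theorem pv_alnum_lower_ne_dot (c : Char) (h : PySem.Chars.isalnum c = true) :
    PySem.Chars.lowerChar c ≠ '.' := by
  have h1 := pv_lower_toNat c h
  intro he
  rw [he] at h1
  have h2 : ('.' : Char).toNat = 46 := rfl
  omega

theorem pv_alnum_lower_not_space (c : Char) (h : PySem.Chars.isalnum c = true) :
    PySem.Chars.isspace (PySem.Chars.lowerChar c) = false := by
  have h1 := pv_lower_toNat c h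
  unfold PySem.Chars.isspace
  simp only [Bool.or_eq_false_iff, Bool.and_eq_false_iff, decide_eq_false_iff_not]
  omega

-- A's fold computes pvAloop
theorem pv_foldl_aloop (cs : List Char) : ∀ (acc : List Char) (p : Bool),
    (cs.foldl
      (fun (st : List Char × Bool) ch =>
        if PySem.Chars.isalnum ch then (st.1 ++ [PySem.Chars.lowerChar ch], false)
        else if st.2 then st else (st.1 ++ ['.'], true))
      (acc, p)).1 = acc ++ pvAloop cs p := by
  induction cs with
  | nil => intro acc p; simp [pvAloop]
  | cons c r ih =>
    intro acc p
    simp only [List.foldl_cons, pvAloop]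
    by_cases hc : PySem.Chars.isalnum c = true
    · simp [hc, ih]
    · simp only [Bool.not_eq_true] at hc
      cases p <;> simp [hc, ih]

-- B's split₀ over the mapped characters computes pvToks
theorem pv_split0_go (cs : List Char) : ∀ (cur : List Char) (acc : List (List Char)),
    PySem.Chars.split₀.go
      (cs.map (fun ch => if PySem.Chars.isalnum ch then PySem.Chars.lowerChar ch else ' '))
      cur acc =
    acc.reverse ++
      (if cur = [] then pvToks cs
       else (cur.reverse ++ (cs.takeWhile PySem.Chars.isalnum).map PySem.Chars.lowerChar)
              :: pvToks (cs.dropWhile PySem.Chars.isalnum)) := by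
  induction cs with
  | nil =>
    intro cur acc
    cases cur <;> simp [PySem.Chars.split₀.go, pvToks]
  | cons c r ih =>
    intro cur acc
    by_cases hc : PySem.Chars.isalnum c = true
    · simp only [List.map_cons, hc, if_pos, PySem.Chars.split₀.go,
        pv_alnum_lower_not_space c hc, Bool.false_eq_true, if_false]
      rw [ih]
      cases cur <;> simp [pvToks, hc]
    · simp only [Bool.not_eq_true] at hc
      have hsp : PySem.Chars.isspace ' ' = true := by decide
      simp only [List.map_cons, hc, Bool.false_eq_true, if_false, PySem.Chars.split₀.go, hsp,
        if_pos]
      cases cur <;> simp [ih, pvToks, hc]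

theorem pv_toks_nil (cs : List Char) (h : pvToks cs = []) :
    ∀ c ∈ cs, PySem.Chars.isalnum c = false := by
  induction cs with
  | nil => simp
  | cons c r ih =>
    intro x hx
    by_cases hc : PySem.Chars.isalnum c = true
    · rw [pvToks, if_pos hc] at h; simp at h
    · simp only [Bool.not_eq_true] at hc
      rw [pvToks, hc] at h
      simp only [Bool.false_eq_true, if_false] at h
      rcases List.mem_cons.mp hx with he | hm
      · rw [he]; exact hc
      · exact ih h x hm

def pvPre : List Char → List Char
  | [] => []
  | c :: _ => if PySem.Chars.isalnum c then [] else ['.']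

theorem pv_aloop_false (cs : List Char) :
    pvAloop cs false = pvPre cs ++ pvAloop cs true := by
  cases cs with
  | nil => rfl
  | cons c r =>
    by_cases hc : PySem.Chars.isalnum c = true <;> simp [pvAloop, pvPre, hc]

theorem pv_aloop_run (run rest : List Char) (h : ∀ c ∈ run, PySem.Chars.isalnum c = true) :
    pvAloop (run ++ rest) false = run.map PySem.Chars.lowerChar ++ pvAloop rest false := by
  induction run with
  | nil => simp
  | cons c r ih =>
    have hc : PySem.Chars.isalnum c = true := h c (List.mem_cons_self)
    simp only [List.cons_append, pvAloop, hc, if_pos, List.map_cons, List.cons_append]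
    rw [ih (fun x hx => h x (List.mem_cons_of_mem _ hx))]

theorem pv_endSep_append (a b : List Char) (hb : b ≠ []) : pvEndSep (a ++ b) = pvEndSep b := by
  unfold pvEndSep
  rw [List.getLast?_append]
  cases hg : b.getLast? with
  | some c => simp
  | none => exact absurd (List.getLast?_eq_none_iff.mp hg) hb

theorem pv_endSep_all_alnum (cs : List Char) (h : ∀ c ∈ cs, PySem.Chars.isalnum c = true) :
    pvEndSep cs = false := by
  unfold pvEndSep
  cases hg : cs.getLast? with
  | none => rfl
  | some c => simp [h c (List.mem_of_getLast? hg)]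

theorem pv_endSep_all_sep (cs : List Char) (hne : cs ≠ [])
    (h : ∀ c ∈ cs, PySem.Chars.isalnum c = false) : pvEndSep cs = true := by
  unfold pvEndSep
  cases hg : cs.getLast? with
  | none => exact absurd (List.getLast?_eq_none_iff.mp hg) hne
  | some c => simp [h c (List.mem_of_getLast? hg)]

theorem pv_aloop_true (cs : List Char) :
    pvAloop cs true = pvJoin (pvToks cs) ++ pvTrail cs := by
  induction cs using pvToks.induct with
  | case1 => simp [pvAloop, pvToks, pvJoin, pvTrail, pvEndSep]
  | case2 c r hc ih =>
    have ht : ∀ x ∈ r.takeWhile PySem.Chars.isalnum, PySem.Chars.isalnum x = true :=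
      fun x hx => List.mem_takeWhile_imp hx
    have hsplit : r.takeWhile PySem.Chars.isalnum ++ r.dropWhile PySem.Chars.isalnum = r :=
      List.takeWhile_append_dropWhile
    have h1 : pvAloop (c :: r) true
        = PySem.Chars.lowerChar c ::
            ((r.takeWhile PySem.Chars.isalnum).map PySem.Chars.lowerChar
              ++ pvAloop (r.dropWhile PySem.Chars.isalnum) false) := by
      simp only [pvAloop, hc, if_pos]
      rw [← hsplit]
      rw [pv_aloop_run _ _ ht]
      simp [hsplit]
    rw [h1]
    rw [pvToks, if_pos hc]
    cases hd : r.dropWhile PySem.Chars.isalnum with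
    | nil =>
      have hall : ∀ x ∈ c :: r, PySem.Chars.isalnum x = true := by
        intro x hx
        rcases List.mem_cons.mp hx with he | hm
        · rw [he]; exact hc
        · rw [← hsplit, hd, List.append_nil] at hm
          exact ht x hm
      simp only [pvAloop, pvToks]
      unfold pvTrail
      rw [pv_endSep_all_alnum _ hall]
      simp [pvJoin]
    | cons x d' =>
      have hx : PySem.Chars.isalnum x = false := by
        have := List.head?_dropWhile_not PySem.Chars.isalnum r
        rw [hd] at this
        simpa using this
      have haf : pvAloop (x :: d') false = '.' :: pvAloop (x :: d') true := by
        rw [pv_aloop_false]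
        simp [pvPre, hx]
      rw [hd] at ih
      rw [haf, ih]
      have hES : pvEndSep (c :: r) = pvEndSep (x :: d') := by
        have : c :: r = (c :: r.takeWhile PySem.Chars.isalnum) ++ (x :: d') := by
          simp only [List.cons_append]
          rw [← hd, hsplit]
        rw [this, pv_endSep_append _ _ (by simp)]
      cases htk : pvToks (x :: d') with
      | nil =>
        have hsep : ∀ y ∈ x :: d', PySem.Chars.isalnum y = false := pv_toks_nil _ htk
        unfold pvTrail
        rw [htk, hES, pv_endSep_all_sep _ (by simp) hsep]
        simp [pvJoin, pvToks, hc]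
      | cons u us =>
        unfold pvTrail
        rw [htk, hES]
        simp only [ne_eq, reduceCtorEq, not_false_eq_true, true_and]
        cases hpe : pvEndSep (x :: d') <;> simp [pvJoin, pvToks, hc]
  | case3 c r hc ih =>
    simp only [Bool.not_eq_true] at hc
    have h1 : pvAloop (c :: r) true = pvAloop r true := by simp [pvAloop, hc]
    have h2 : pvToks (c :: r) = pvToks r := by rw [pvToks, hc]; simp
    rw [h1, ih, h2]
    cases hr : r with
    | nil =>
      subst hr
      unfold pvTrail
      simp [pvToks, pvEndSep, hc]
    | cons y r' =>
      subst hr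
      have hES : pvEndSep (c :: y :: r') = pvEndSep (y :: r') := by
        have h3 : c :: y :: r' = [c] ++ (y :: r') := rfl
        rw [h3, pv_endSep_append _ _ (by simp)]
      unfold pvTrail
      rw [h2, hES]

-- every token of pvToks is nonempty and dot-free
theorem pv_toks_chars (cs : List Char) :
    ∀ t ∈ pvToks cs, t ≠ [] ∧ ∀ x ∈ t, x ≠ '.' := by
  induction cs using pvToks.induct with
  | case1 => simp [pvToks]
  | case2 c r hc ih =>
    rw [pvToks, if_pos hc]
    intro t ht
    rcases List.mem_cons.mp ht with he | hm
    · subst he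
      refine ⟨by simp, ?_⟩
      intro x hx
      rcases List.mem_cons.mp hx with he | hm
      · rw [he]; exact pv_alnum_lower_ne_dot c hc
      · obtain ⟨y, hy, hyx⟩ := List.mem_map.mp hm
        rw [← hyx]
        exact pv_alnum_lower_ne_dot y (List.mem_takeWhile_imp hy)
    · exact ih t hm
  | case3 c r hc ih =>
    simp only [Bool.not_eq_true] at hc
    rw [pvToks, hc]
    simpa using ih

theorem pv_join_ne_nil (t : List Char) (ts : List (List Char)) (h : t ≠ []) :
    pvJoin (t :: ts) ≠ [] := by
  cases ts <;> simp [pvJoin, h]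

theorem pv_join_head (t : List Char) (ts : List (List Char)) :
    ∃ rest, pvJoin (t :: ts) = t ++ rest := by
  cases ts with
  | nil => exact ⟨[], by simp [pvJoin]⟩
  | cons u us => exact ⟨'.' :: pvJoin (u :: us), rfl⟩

theorem pv_join_last_ne_dot (ts : List (List Char)) (hts : ∀ t ∈ ts, t ≠ [] ∧ ∀ x ∈ t, x ≠ '.') :
    ∀ x ∈ (pvJoin ts).reverse.head?, x ≠ '.' := by
  induction ts with
  | nil => simp [pvJoin]
  | cons t ts ih =>
    cases ts with
    | nil =>
      simp only [pvJoin, List.head?_reverse]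
      intro x hx
      exact (hts t (by simp)).2 x (List.mem_of_getLast? hx)
    | cons u us =>
      have hne : pvJoin (u :: us) ≠ [] :=
        pv_join_ne_nil u us (hts u (by simp)).1
      have h2 := ih (fun s hs => hts s (List.mem_cons_of_mem _ hs))
      cases hrev : (pvJoin (u :: us)).reverse with
      | nil => exact absurd (by simpa using hrev) hne
      | cons a as =>
        have ha : a ≠ '.' := by rw [hrev] at h2; simpa using h2
        have hshape : pvJoin (t :: u :: us) = t ++ '.' :: pvJoin (u :: us) := rfl
        rw [hshape, List.reverse_append, List.reverse_cons, hrev]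
        intro x hx
        simp only [List.cons_append, List.head?_cons, Option.mem_def, Option.some.injEq] at hx
        subst hx
        exact ha

-- stripChars of pre ++ mid ++ post
theorem pv_dropWhile_head_ne (p : Char → Bool) (l : List Char)
    (h : ∀ x ∈ l.head?, p x = false) : l.dropWhile p = l := by
  cases l with
  | nil => rfl
  | cons x xs =>
    rw [List.dropWhile_cons]
    simp only [List.head?_cons, Option.mem_def, Option.some.injEq, forall_eq'] at h
    simp [h]

theorem pv_join_intercalate : ∀ ts : List (List Char), List.intercalate ['.'] ts = pvJoin ts
  | [] => by simp [pvJoin, List.intercalate]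
  | [t] => by simp [pvJoin, List.intercalate]
  | t :: u :: us => by
    have hih := pv_join_intercalate (u :: us)
    simp only [List.intercalate, List.intersperse] at hih ⊢
    simp only [List.flatten_cons, pvJoin]
    rw [← hih]
    simp

theorem pv_strip_concat (pre mid post : List Char)
    (hpre : pre = [] ∨ pre = ['.']) (hpost : post = [] ∨ post = ['.'])
    (hhead : ∀ x ∈ mid.head?, x ≠ '.') (hlast : ∀ x ∈ mid.reverse.head?, x ≠ '.')
    (hne : mid ≠ []) :
    PySem.Chars.stripChars (pre ++ mid ++ post) ['.'] = mid := by
  have hp : ∀ x : Char, x ≠ '.' → (['.'] : List Char).contains x = false := by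
    intro x hx
    simpa using hx
  have hpd : (['.'] : List Char).contains '.' = true := by decide
  unfold PySem.Chars.stripChars
  show (List.dropWhile (fun c => (['.'] : List Char).contains c)
      ((List.dropWhile (fun c => (['.'] : List Char).contains c) (pre ++ mid ++ post)).reverse)).reverse = mid
  have h1 : List.dropWhile (fun c => (['.'] : List Char).contains c) (pre ++ mid ++ post)
      = mid ++ post := by
    rw [List.append_assoc]
    have h2 : List.dropWhile (fun c => (['.'] : List Char).contains c) (mid ++ post)
        = mid ++ post := by
      apply pv_dropWhile_head_ne
      intro x hx
      cases mid with
      | nil => exact absurd rfl hne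
      | cons a b =>
        have hax : a = x := by simpa using hx
        subst hax
        exact hp a (hhead a (by simp))
    rcases hpre with h | h <;> subst h
    · simpa using h2
    · simp only [List.cons_append, List.nil_append, List.dropWhile_cons, hpd]
      exact h2
  rw [h1]
  have h3 : (mid ++ post).reverse = post.reverse ++ mid.reverse := List.reverse_append
  rw [h3]
  have h4 : List.dropWhile (fun c => (['.'] : List Char).contains c) (post.reverse ++ mid.reverse)
      = mid.reverse := by
    have h5 : List.dropWhile (fun c => (['.'] : List Char).contains c) mid.reverse
        = mid.reverse := by
      apply pv_dropWhile_head_ne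
      intro x hx
      exact hp x (hlast x hx)
    rcases hpost with h | h <;> subst h
    · simpa using h5
    · simp only [List.reverse_cons, List.reverse_nil, List.nil_append, List.cons_append,
        List.dropWhile_cons, hpd]
      exact h5
  rw [h4, List.reverse_reverse]

theorem pv_main (cs : List Char) :
    PySem.Chars.stripChars (pvAloop cs false) ['.'] =
      PySem.Chars.join ['.']
        (PySem.Chars.split₀
          (cs.map (fun ch => if PySem.Chars.isalnum ch then PySem.Chars.lowerChar ch else ' '))) := by
  have hsplit : PySem.Chars.split₀
      (cs.map (fun ch => if PySem.Chars.isalnum ch then PySem.Chars.lowerChar ch else ' '))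
      = pvToks cs := by
    unfold PySem.Chars.split₀
    rw [pv_split0_go]
    simp
  rw [hsplit]
  have hjoin : PySem.Chars.join ['.'] (pvToks cs) = pvJoin (pvToks cs) := by
    unfold PySem.Chars.join
    exact pv_join_intercalate _
  rw [hjoin, pv_aloop_false, pv_aloop_true]
  cases hts : pvToks cs with
  | nil =>
    have hsep := pv_toks_nil cs hts
    unfold pvTrail
    rw [hts]
    cases cs with
    | nil => rfl
    | cons c r =>
      have hc : PySem.Chars.isalnum c = false := hsep c (by simp)
      simp only [pvPre, hc, Bool.false_eq_true, if_false, pvJoin, ne_eq, not_true_eq_false,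
        false_and, List.append_nil]
      rfl
  | cons t ts' =>
    have hchars := pv_toks_chars cs
    rw [hts] at hchars
    have htne : t ≠ [] := (hchars t (by simp)).1
    have hne : pvJoin (t :: ts') ≠ [] := pv_join_ne_nil t ts' htne
    have hhead : ∀ x ∈ (pvJoin (t :: ts')).head?, x ≠ '.' := by
      obtain ⟨rest, hjr⟩ := pv_join_head t ts'
      rw [hjr]
      cases t with
      | nil => exact absurd rfl htne
      | cons a b =>
        intro x hx
        have hax : a = x := by simpa using hx
        subst hax
        exact (hchars (a :: b) (by simp)).2 a (by simp)
    have hlast : ∀ x ∈ (pvJoin (t :: ts')).reverse.head?, x ≠ '.' :=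
      pv_join_last_ne_dot (t :: ts') hchars
    have hpre : pvPre cs = [] ∨ pvPre cs = ['.'] := by
      cases cs with
      | nil => left; rfl
      | cons c r =>
        by_cases hc : PySem.Chars.isalnum c = true
        · left; simp [pvPre, hc]
        · right; simp only [Bool.not_eq_true] at hc; simp [pvPre, hc]
    have hpost : pvTrail cs = [] ∨ pvTrail cs = ['.'] := by
      unfold pvTrail
      split
      · right; rfl
      · left; rfl
    rw [← List.append_assoc]
    exact pv_strip_concat _ _ _ hpre hpost hhead hlast hne

-- ===== VERDICT (by name: the statement is the Claim_ definition above) =====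
theorem normalize_col_token_py_spec : Claim_equal_normalize_col_token_py := by
  intro name _
  unfold Spec_normalize_col_token_py normalize_col_token_py normalize_col_token_py_alt
  apply String.toList_inj.mp
  rw [PySem.Str.toList_stripChars, PySem.Str.toList_join, PySem.Str.split₀_map_toList]
  rw [pv_foldl_aloop]
  simp only [String.toList_ofList, List.nil_append]
  exact pv_main (PySem.Str.strip name).toList
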